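-- pv_equiv track=rewrite | github.com/girish-n-s/Machine-learning-practice- | naive_bayes_classifier/app.py | split_cust
-- ===== SOURCE A (Python) =====
-- def split_cust(email):
--     words=[]
--     common_words = set(['a','as','are','at','to','too','or','and','subject','what','when','not','re','let'])
--
--     email =email.lower()
--     i=0
--     j=0
--     count=0
--     while (i<len(email)):
--         while((i<len(email))and(email[i]!=' ' and email[i]!='\n' and email[i]!='\t' and email[i]!=',' and email[i]!='-' and email[i]!=':' and email[i]!='.' and email[i]!= "'" and email[i]!='"' and email[i]!='_')):
--             i+=1
--         word = email[j:i]
--         while((i<len(email))and(email[i]==' ' or email[i]=='\n' or email[i]=='\t' or email[i]==',' or email[i]=='-' or email[i]==':' or email[i]=='.' or email[i]== "'" or email[i]=='"' or email[i]=='_')):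
--             i+=1
--         j=i
--         if  word not in common_words and word != '':
--             words.append(word)
--             count+=1
--     return words
-- ===== SOURCE B (Python) =====
-- def split_cust(email):
--     common_words = {'a','as','are','at','to','too','or','and','subject','what','when','not','re','let'}
--     table = str.maketrans({d: ' ' for d in " \n\t,-:.'\"_"})
--     cleaned = email.lower().translate(table)
--     return [w for w in cleaned.split(' ') if w and w not in common_words]
-- ===== Notes on version B (the rewrite author's own statement) =====
-- stated objective: idiomatic
-- what changed: Replaces A's manual index-walking two-inner-while character scanner with a translate table mapping delimiters to spaces, one single-space split, and a filter dropping empty and common tokens (C-level string ops instead of per-character Python loops).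
import Mathlib
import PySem

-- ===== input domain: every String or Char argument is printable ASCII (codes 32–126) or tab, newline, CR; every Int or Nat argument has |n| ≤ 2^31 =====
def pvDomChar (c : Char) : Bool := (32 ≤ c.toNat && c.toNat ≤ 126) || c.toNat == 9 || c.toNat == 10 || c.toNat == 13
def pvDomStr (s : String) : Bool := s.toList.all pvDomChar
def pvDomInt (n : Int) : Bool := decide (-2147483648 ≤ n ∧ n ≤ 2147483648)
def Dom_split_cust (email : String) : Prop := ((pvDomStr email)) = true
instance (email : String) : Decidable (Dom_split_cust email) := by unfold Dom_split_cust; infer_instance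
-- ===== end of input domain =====

-- B replaces A's manual index-walking scanner by translate-delimiters-to-space, split on ' ', filter (idiomatic; same ordered result).

-- ===== PORT A =====
-- the ten delimiter characters tested by A's two inner while loops
def pvDelim (c : Char) : Bool :=
  c == ' ' || c == '\n' || c == '\t' || c == ',' || c == '-' || c == ':' ||
  c == '.' || c == '\'' || c == '"' || c == '_'

def pvCommon : List String :=
  ["a","as","are","at","to","too","or","and","subject","what","when","not","re","let"]

-- needed by splitAGo's decreasing_by
lemma pvRestLt (c : Char) (cs : List Char) :
    (List.dropWhile pvDelim (List.dropWhile (fun x => !pvDelim x) (c :: cs))).length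
      < (c :: cs).length := by
  by_cases h : pvDelim c
  · rw [List.dropWhile_cons_of_neg (by simp [h]), List.dropWhile_cons_of_pos h]
    exact Nat.lt_succ_of_le (List.length_dropWhile_le _ _)
  · rw [List.dropWhile_cons_of_pos (by simp [h])]
    exact Nat.lt_succ_of_le
      (Nat.le_trans (List.length_dropWhile_le _ _) (List.length_dropWhile_le _ _))

-- A's outer while loop; the two inner index-advancing while loops are the
-- takeWhile / dropWhile over the same characters (word = email[j:i]).
def splitAGo : List Char → List String
  | [] => []
  | c :: cs =>
    let word := String.mk (List.takeWhile (fun x => !pvDelim x) (c :: cs))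
    let rest := List.dropWhile pvDelim (List.dropWhile (fun x => !pvDelim x) (c :: cs))
    if !(pvCommon.contains word) && word != "" then word :: splitAGo rest
    else splitAGo rest
  termination_by l => l.length
  decreasing_by all_goals exact pvRestLt c cs

def split_cust (email : String) : List String :=
  splitAGo (PySem.Str.lower email).toList

-- ===== PORT B =====
-- translate-table of Source B: delimiters become ' ', everything else unchanged
def pvToSpace (c : Char) : Char := if pvDelim c then ' ' else c

-- Python's str.split(' '): split at every single space, keeping empty pieces
def pvSplitSp : List Char → List (List Char)
  | [] => [[]]
  | c :: cs =>
    let r := pvSplitSp cs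
    if c = ' ' then [] :: r
    else match r with
      | [] => [[c]]
      | t :: ts => (c :: t) :: ts

def split_cust_alt (email : String) : List String :=
  ((pvSplitSp ((PySem.Str.lower email).toList.map pvToSpace)).map String.mk).filter
    (fun w => w != "" && !(pvCommon.contains w))

-- ===== PRECONDITION & SPEC =====
def Spec_split_cust (email : String) (out : List String) : Prop := out = split_cust_alt email
instance (email : String) (out : List String) : Decidable (Spec_split_cust email out) := by unfold Spec_split_cust; infer_instance

-- ===== CLAIM (what is proved, stated in full; the proofs are below) =====
def Claim_equal_split_cust : Prop := ∀ (email : String), Dom_split_cust email → Spec_split_cust email (split_cust email)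

-- ===== LEMMAS AND PROOFS =====

lemma mk_nil : String.mk ([] : List Char) = "" := by decide

-- one unfolding of A's outer loop
lemma splitAGo_cons (c : Char) (cs : List Char) :
    splitAGo (c :: cs) =
      (if !(pvCommon.contains (String.mk (List.takeWhile (fun x => !pvDelim x) (c :: cs)))) &&
          (String.mk (List.takeWhile (fun x => !pvDelim x) (c :: cs))) != ""
       then String.mk (List.takeWhile (fun x => !pvDelim x) (c :: cs)) ::
            splitAGo (List.dropWhile pvDelim (List.dropWhile (fun x => !pvDelim x) (c :: cs)))
       else splitAGo (List.dropWhile pvDelim (List.dropWhile (fun x => !pvDelim x) (c :: cs)))) := by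
  rw [splitAGo.eq_def]

lemma splitAGo_nil : splitAGo [] = [] := by rw [splitAGo.eq_def]

-- the filter predicates of the two ports agree
lemma pred_comm (w : String) :
    (w != "" && !(pvCommon.contains w)) = (!(pvCommon.contains w) && w != "") :=
  Bool.and_comm _ _

lemma dropWhile_head_not {α : Type} (p : α → Bool) :
    ∀ (l : List α) (d : α) (rest : List α),
      List.dropWhile p l = d :: rest → p d = false := by
  intro l
  induction l with
  | nil => intro d rest h; simp [List.dropWhile] at h
  | cons a l ih =>
    intro d rest h
    by_cases hp : p a
    · rw [List.dropWhile_cons_of_pos hp] at h; exact ih d rest h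
    · rw [List.dropWhile_cons_of_neg hp] at h
      cases h
      exact Bool.of_not_eq_true hp

-- a leading delimiter run is irrelevant to A's scanner
lemma splitAGo_dropWhile (cs : List Char) :
    splitAGo (List.dropWhile pvDelim cs) = splitAGo cs := by
  cases cs with
  | nil => rfl
  | cons c cs =>
    by_cases h : pvDelim c
    · rw [List.dropWhile_cons_of_pos h, splitAGo_cons,
          List.takeWhile_cons_of_neg (by simp [h]),
          List.dropWhile_cons_of_neg (by simp [h]), List.dropWhile_cons_of_pos h, mk_nil]
      simp
    · rw [List.dropWhile_cons_of_neg h]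

-- pvSplitSp on the translated string peels off the first non-delimiter run
lemma splitSp_map (cs : List Char) :
    pvSplitSp (cs.map pvToSpace) =
      List.takeWhile (fun x => !pvDelim x) cs ::
        (pvSplitSp ((List.dropWhile (fun x => !pvDelim x) cs).map pvToSpace)).tail := by
  induction cs with
  | nil => rfl
  | cons c cs ih =>
    by_cases h : pvDelim c
    · have hc : pvToSpace c = ' ' := by simp [pvToSpace, h]
      rw [List.takeWhile_cons_of_neg (by simp [h]),
          List.dropWhile_cons_of_neg (by simp [h])]
      simp [pvSplitSp, hc]
    · have hc : pvToSpace c = c := by simp [pvToSpace, h]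
      have hcs : ¬ (c = ' ') := by
        intro e; subst e; exact h rfl
      rw [List.takeWhile_cons_of_pos (by simp [h]),
          List.dropWhile_cons_of_pos (by simp [h])]
      simp only [List.map_cons, hc, pvSplitSp, ih, if_neg hcs]

lemma main_lemma : ∀ (n : ℕ) (cs : List Char), cs.length ≤ n →
    ((pvSplitSp (cs.map pvToSpace)).map String.mk).filter
        (fun w => w != "" && !(pvCommon.contains w)) = splitAGo cs := by
  intro n
  induction n with
  | zero =>
    intro cs h
    have : cs = [] := List.eq_nil_of_length_eq_zero (Nat.le_zero.mp h)
    subst this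
    rw [splitAGo.eq_def]
    simp [pvSplitSp, mk_nil]
  | succ n ih =>
    intro cs hlen
    match cs with
    | [] => rw [splitAGo.eq_def]; simp [pvSplitSp, mk_nil]
    | c :: cs' =>
      by_cases h : pvDelim c
      · -- head is a delimiter: B drops one empty token; A drops the whole run
        have hc : pvToSpace c = ' ' := by simp [pvToSpace, h]
        have step :
            ((pvSplitSp ((c :: cs').map pvToSpace)).map String.mk).filter
                (fun w => w != "" && !(pvCommon.contains w)) =
            ((pvSplitSp (cs'.map pvToSpace)).map String.mk).filter
                (fun w => w != "" && !(pvCommon.contains w)) := by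
          simp [pvSplitSp, hc, mk_nil]
        rw [step, ih cs' (Nat.le_of_succ_le_succ hlen)]
        rw [splitAGo_cons, List.takeWhile_cons_of_neg (by simp [h]),
            List.dropWhile_cons_of_neg (by simp [h]), List.dropWhile_cons_of_pos h,
            mk_nil]
        simp [splitAGo_dropWhile]
      · -- head starts a word
        cases hre : List.dropWhile (fun x => !pvDelim x) (c :: cs') with
        | nil =>
          rw [splitSp_map (c :: cs'), splitAGo_cons, hre]
          simp only [List.map_nil, List.dropWhile_nil, splitAGo_nil]
          have hps : pvSplitSp ([] : List Char) = [[]] := rfl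
          rw [hps]
          simp only [List.tail_cons, List.map_cons, List.map_nil, List.filter_cons,
            List.filter_nil]
          rw [pred_comm]
        | cons d rest =>
          have hd : pvDelim d = true := by
            have := dropWhile_head_not (fun x => !pvDelim x) (c :: cs') d rest hre
            simpa using this
          have hdc : pvToSpace d = ' ' := by simp [pvToSpace, hd]
          have hrest : rest.length ≤ n := by
            have h2 := List.length_dropWhile_le (fun x => !pvDelim x) cs'
            rw [List.dropWhile_cons, if_pos (by simp [h])] at hre
            rw [hre] at h2
            simp only [List.length_cons] at h2
            have h3 : (c :: cs').length ≤ n + 1 := hlen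
            simp only [List.length_cons] at h3
            omega
          rw [splitSp_map (c :: cs')]
          rw [splitAGo_cons]
          rw [List.dropWhile_cons, if_pos (by simp [h])] at hre
          rw [List.dropWhile_cons, if_pos (by simp [h]), hre]
          simp only [List.map_cons, hdc]
          have htail : (pvSplitSp (' ' :: rest.map pvToSpace)).tail =
              pvSplitSp (rest.map pvToSpace) := by simp [pvSplitSp]
          rw [htail, List.dropWhile_cons_of_pos hd, splitAGo_dropWhile]
          simp only [List.filter_cons]
          rw [ih rest hrest, pred_comm]

-- ===== VERDICT (by name: the statement is the Claim_ definition above) =====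
theorem split_cust_spec : Claim_equal_split_cust := by
  intro email _
  unfold Spec_split_cust split_cust split_cust_alt
  exact (main_lemma _ _ (Nat.le_refl _)).symm
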